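-- pv_equiv track=rewrite | github.com/SodaqMoja/XRF | xrf/xrf.py | get_crc16_ccitt
-- ===== SOURCE A (Python) =====
-- def get_crc16_ccitt(message):
--     '''
--     This is the algorithm as described in avr-libc util/crc16.h for _crc_ccitt_update()
--     uint16_t
--     crc_ccitt_update (uint16_t crc, uint8_t data)
--     {
--         data ^= lo8 (crc);
--         data ^= data << 4;
--
--         return ((((uint16_t)data << 8) | hi8 (crc)) ^ (uint8_t)(data >> 4)
--                 ^ ((uint16_t)data << 3));
--     }
--     '''
--     crc = 0xffff
--     for b in message:
--         # Do the crc_ccitt_update for each byte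
--         b = ord(b)
--         b ^= crc & 0xff
--         b ^= b << 4
--         b = b & 0xff
--         crc = ((b << 8) | (crc >> 8)) ^ (b >> 4) ^ (b << 3)
--         crc &= 0xffff
--     return crc
-- ===== SOURCE B (Python) =====
-- def get_crc16_ccitt(message):
--     # Table-driven CRC-16-CCITT: precompute the 256-entry table, then one lookup per byte.
--     table = []
--     for x in range(256):
--         d = (x ^ (x << 4)) & 0xff
--         table.append(((d << 8) ^ (d >> 4) ^ (d << 3)) & 0xffff)
--     crc = 0xffff
--     for b in message:
--         crc = (crc >> 8) ^ table[(crc ^ ord(b)) & 0xff]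
--     return crc
-- ===== Notes on version B (the rewrite author's own statement) =====
-- stated objective: faster
-- what changed: Replaces the inline per-byte bit manipulation with a precomputed 256-entry lookup table built once before the loop, so the message pass is a single shift-xor-lookup per character.
import Mathlib
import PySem

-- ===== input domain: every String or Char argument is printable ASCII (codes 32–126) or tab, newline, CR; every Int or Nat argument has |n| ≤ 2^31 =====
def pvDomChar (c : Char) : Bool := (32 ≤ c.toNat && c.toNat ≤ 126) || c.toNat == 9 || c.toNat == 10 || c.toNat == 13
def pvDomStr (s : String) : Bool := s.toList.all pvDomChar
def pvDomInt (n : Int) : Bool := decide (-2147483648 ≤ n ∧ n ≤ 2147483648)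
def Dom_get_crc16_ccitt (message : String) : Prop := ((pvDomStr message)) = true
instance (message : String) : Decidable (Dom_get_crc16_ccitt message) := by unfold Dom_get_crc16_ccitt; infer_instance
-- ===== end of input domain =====

-- B replaces A's inline per-byte bit manipulation by a precomputed 256-entry lookup table
-- built before the loop (objective: alternative decomposition; same O(n) cost).

-- ===== PORT A =====
-- per-character update, exactly A's loop body (all values are nonnegative Python ints)
def crcUpdateA (crc : Nat) (c : Char) : Nat :=
  let b0 := c.toNat ^^^ (crc &&& 0xff)
  let b1 := b0 ^^^ (b0 <<< 4)
  let b  := b1 &&& 0xff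
  ((((b <<< 8) ||| (crc >>> 8)) ^^^ (b >>> 4)) ^^^ (b <<< 3)) &&& 0xffff

def get_crc16_ccitt (message : String) : Int :=
  ((message.toList.foldl crcUpdateA 0xffff : Nat) : Int)

-- ===== PORT B =====
-- table entry for byte x, exactly Source B's table-building loop body
def crcEntry (x : Nat) : Nat :=
  let d := (x ^^^ (x <<< 4)) &&& 0xff
  (((d <<< 8) ^^^ (d >>> 4)) ^^^ (d <<< 3)) &&& 0xffff

def crcTable : List Nat := (List.range 256).map crcEntry

def crcUpdateB (crc : Nat) (c : Char) : Nat :=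
  (crc >>> 8) ^^^ crcTable.getD ((crc ^^^ c.toNat) &&& 0xff) 0

def get_crc16_ccitt_alt (message : String) : Int :=
  ((message.toList.foldl crcUpdateB 0xffff : Nat) : Int)

-- ===== PRECONDITION & SPEC =====
def Spec_get_crc16_ccitt (message : String) (out : Int) : Prop := out = get_crc16_ccitt_alt message
instance (message : String) (out : Int) : Decidable (Spec_get_crc16_ccitt message out) := by unfold Spec_get_crc16_ccitt; infer_instance

-- ===== CLAIM (what is proved, stated in full; the proofs are below) =====
def Claim_equal_get_crc16_ccitt : Prop := ∀ (message : String), Dom_get_crc16_ccitt message → Spec_get_crc16_ccitt message (get_crc16_ccitt message)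

-- ===== LEMMAS AND PROOFS =====

-- low-byte extraction commutes with xor against a byte-sized value
theorem pv_xor_and_255 (code crc : Nat) (h : code < 256) :
    code ^^^ (crc &&& 255) = (crc ^^^ code) &&& 255 := by
  apply Nat.eq_of_testBit_eq
  intro i
  have h255 : (255 : Nat) = 2 ^ 8 - 1 := by norm_num
  simp only [h255, Nat.testBit_and, Nat.testBit_xor, Nat.testBit_two_pow_sub_one]
  by_cases h8 : i < 8
  · simp [h8, Bool.xor_comm]
  · have hpow : (2:Nat) ^ 8 ≤ 2 ^ i := Nat.pow_le_pow_right (by norm_num) (by omega)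
    have hc : code.testBit i = false := Nat.testBit_eq_false_of_lt (by omega)
    simp [h8, hc]

-- the table entry absorbs everything except the xor with the old high byte
theorem pv_key (b hi : Nat) (hhi : hi < 256) :
    ((((b <<< 8) ||| hi) ^^^ (b >>> 4)) ^^^ (b <<< 3)) &&& 65535
      = hi ^^^ ((((b <<< 8) ^^^ (b >>> 4)) ^^^ (b <<< 3)) &&& 65535) := by
  apply Nat.eq_of_testBit_eq
  intro i
  have h65535 : (65535 : Nat) = 2 ^ 16 - 1 := by norm_num
  have hhb : ∀ j, 8 ≤ j → hi.testBit j = false := by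
    intro j hj
    have hpow : (2:Nat) ^ 8 ≤ 2 ^ j := Nat.pow_le_pow_right (by norm_num) hj
    exact Nat.testBit_eq_false_of_lt (by omega)
  simp only [h65535, Nat.testBit_and, Nat.testBit_or, Nat.testBit_xor,
    Nat.testBit_shiftLeft, Nat.testBit_two_pow_sub_one]
  by_cases h8 : i < 8
  · have : (decide (8 ≤ i)) = false := by simp; omega
    simp [this, show i < 16 by omega]
  · have hhi' : hi.testBit i = false := hhb i (by omega)
    by_cases h16 : i < 16 <;> simp [hhi', h16]

theorem pv_table_getD (x : Nat) (h : x < 256) : crcTable.getD x 0 = crcEntry x := by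
  simp [crcTable, List.getD, h]

theorem pv_step_eq (crc : Nat) (c : Char) (hcrc : crc < 65536) (hc : c.toNat < 256) :
    crcUpdateA crc c = crcUpdateB crc c := by
  have hx : (crc ^^^ c.toNat) &&& 255 < 256 :=
    lt_of_le_of_lt (Nat.and_le_right) (by norm_num)
  have hhi : crc >>> 8 < 256 := by
    rw [Nat.shiftRight_eq_div_pow]
    omega
  have hb0 : c.toNat ^^^ (crc &&& 255) = (crc ^^^ c.toNat) &&& 255 :=
    pv_xor_and_255 c.toNat crc hc
  simp only [crcUpdateA, crcUpdateB, pv_table_getD _ hx, crcEntry]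
  rw [hb0]
  exact pv_key _ _ hhi

theorem pv_fold_eq (l : List Char) (hl : ∀ c ∈ l, c.toNat < 256) :
    ∀ crc, crc < 65536 → l.foldl crcUpdateA crc = l.foldl crcUpdateB crc := by
  induction l with
  | nil => intro crc _; rfl
  | cons c t ih =>
    intro crc hcrc
    have hc : c.toNat < 256 := hl c (by simp)
    have hnext : crcUpdateA crc c < 65536 :=
      lt_of_le_of_lt (Nat.and_le_right) (by norm_num)
    calc (c :: t).foldl crcUpdateA crc = t.foldl crcUpdateA (crcUpdateA crc c) := rfl
      _ = t.foldl crcUpdateB (crcUpdateA crc c) := ih (fun d hd => hl d (by simp [hd])) _ hnext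
      _ = t.foldl crcUpdateB (crcUpdateB crc c) := by rw [pv_step_eq crc c hcrc hc]
      _ = (c :: t).foldl crcUpdateB crc := rfl

-- ===== VERDICT (by name: the statement is the Claim_ definition above) =====
theorem get_crc16_ccitt_spec : Claim_equal_get_crc16_ccitt := by
  intro message hdom
  have hl : ∀ c ∈ message.toList, c.toNat < 256 := by
    intro c hc
    have := List.all_eq_true.mp hdom c hc
    simp [pvDomChar] at this
    omega
  unfold Spec_get_crc16_ccitt get_crc16_ccitt get_crc16_ccitt_alt
  rw [pv_fold_eq message.toList hl 0xffff (by norm_num)]
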